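-- pv_equiv track=rewrite | github.com/Chaewon-Leee/STUDY-Programmers | 옹알이_(1)/chaewon/chaewon.py | solution
-- ===== SOURCE A (Python) =====
-- from itertools import permutations
--
-- def solution(babbling):
--     answer = 0
--     can_speak = ["aya", "ye", "woo", "ma"]
--     all_of_words = []
--
--     ## 모든 조합 구하기
--     for i in range(1, len(can_speak) +1): # 1~len길이까지
--       all_of_words += [''.join(i) for i in list(permutations(can_speak, i))]
--
--     for i in babbling:
--       if i in all_of_words:
--         answer += 1
--     return answer
-- ===== SOURCE B (Python) =====
-- def solution(babbling):
--     words = ("aya", "ye", "woo", "ma")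
--     def speakable(s):
--         used = set()
--         rest = s
--         while rest:
--             for w in words:
--                 if rest.startswith(w) and w not in used:
--                     used.add(w)
--                     rest = rest[len(w):]
--                     break
--             else:
--                 return False
--         return bool(s)
--     return sum(1 for s in babbling if speakable(s))
-- ===== Notes on version B (the rewrite author's own statement) =====
-- stated objective: alternative
-- what changed: B drops A's precomputation of all 64 join-of-permutations strings and its linear membership scan; each babbling word is instead parsed front-to-back, consuming one not-yet-used word of {aya,ye,woo,ma} at a time (their first letters are pairwise distinct, so the match is deterministic), counting the word iff it is non-empty and fully consumed.
import Mathlib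
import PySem

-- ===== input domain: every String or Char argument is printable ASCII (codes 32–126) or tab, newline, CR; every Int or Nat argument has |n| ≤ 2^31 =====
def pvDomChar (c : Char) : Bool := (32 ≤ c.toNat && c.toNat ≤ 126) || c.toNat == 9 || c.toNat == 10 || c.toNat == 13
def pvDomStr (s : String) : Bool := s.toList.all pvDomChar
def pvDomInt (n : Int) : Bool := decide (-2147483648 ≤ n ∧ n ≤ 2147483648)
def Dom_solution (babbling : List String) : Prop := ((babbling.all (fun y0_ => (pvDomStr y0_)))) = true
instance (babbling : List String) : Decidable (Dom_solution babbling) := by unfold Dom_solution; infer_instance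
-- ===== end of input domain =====

-- B replaces A's precomputed list of all 64 permutation-joins and its linear membership
-- scan by a direct front-to-back parser that consumes one unused word at a time (alternative decomposition).

-- ===== PORT A =====
-- itertools.permutations(l, k) in itertools order: pick each element (with the rest) left to right
def pvSelects {α : Type} : List α → List (α × List α)
  | [] => []
  | x :: xs => (x, xs) :: (pvSelects xs).map (fun p => (p.1, x :: p.2))

def pvPerms {α : Type} : Nat → List α → List (List α)
  | 0, _ => [[]]
  | k + 1, l => (pvSelects l).flatMap (fun p => (pvPerms k p.2).map (fun q => p.1 :: q))

def canSpeakA : List String := ["aya", "ye", "woo", "ma"]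

-- the loop 'for i in range(1, len(can_speak)+1): all_of_words += [''.join(p) for p in permutations(can_speak, i)]'
def allOfWordsA : List String :=
  (List.range' 1 canSpeakA.length).foldl
    (fun acc i => acc ++ (pvPerms i canSpeakA).map (fun p => String.join p)) []

def solution (babbling : List String) : Int :=
  babbling.foldl (fun answer i => if i ∈ allOfWordsA then answer + 1 else answer) 0

-- ===== PORT B =====
-- the 'while rest:' loop of Source B: flags = which of aya/ye/woo/ma are still unused
def speakGo : List Char → Bool → Bool → Bool → Bool → Bool
  | [], _, _, _, _ => true
  | c :: cs, a, y, w, m =>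
    if ['a','y','a'].isPrefixOf (c :: cs) && a then speakGo ((c :: cs).drop 3) false y w m
    else if ['y','e'].isPrefixOf (c :: cs) && y then speakGo ((c :: cs).drop 2) a false w m
    else if ['w','o','o'].isPrefixOf (c :: cs) && w then speakGo ((c :: cs).drop 3) a y false m
    else if ['m','a'].isPrefixOf (c :: cs) && m then speakGo ((c :: cs).drop 2) a y w false
    else false
  termination_by cs _ _ _ _ => cs.length
  decreasing_by all_goals simp

def speakableB (s : String) : Bool :=
  if speakGo s.toList true true true true then !s.isEmpty else false

def solution_alt (babbling : List String) : Int :=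
  babbling.foldl (fun n s => if speakableB s then n + 1 else n) 0

-- ===== PRECONDITION & SPEC =====
def Spec_solution (babbling : List String) (out : Int) : Prop := out = solution_alt babbling
instance (babbling : List String) (out : Int) : Decidable (Spec_solution babbling out) := by unfold Spec_solution; infer_instance

-- ===== CLAIM (what is proved, stated in full; the proofs are below) =====
def Claim_equal_solution : Prop := ∀ (babbling : List String), Dom_solution babbling → Spec_solution babbling (solution babbling)

-- ===== LEMMAS AND PROOFS =====

-- all strings producible from the still-available words (fuel n ≥ number of available flags)
def Jwords : Nat → Bool → Bool → Bool → Bool → List (List Char)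
  | 0, _, _, _, _ => [[]]
  | n + 1, a, y, w, m =>
    [[]] ++ (if a then (Jwords n false y w m).map (['a','y','a'] ++ ·) else [])
         ++ (if y then (Jwords n a false w m).map (['y','e'] ++ ·) else [])
         ++ (if w then (Jwords n a y false m).map (['w','o','o'] ++ ·) else [])
         ++ (if m then (Jwords n a y w false).map (['m','a'] ++ ·) else [])

theorem speakGo_iff (n : Nat) : ∀ (cs : List Char) (a y w m : Bool),
    a.toNat + y.toNat + w.toNat + m.toNat ≤ n →
    (speakGo cs a y w m = true ↔ cs ∈ Jwords n a y w m) := by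
  induction n with
  | zero =>
    intro cs a y w m h
    have ha : a = false := by cases a <;> simp_all
    have hy : y = false := by cases y <;> simp_all
    have hw : w = false := by cases w <;> simp_all
    have hm : m = false := by cases m <;> simp_all
    subst ha hy hw hm
    cases cs with
    | nil => simp [speakGo, Jwords]
    | cons c cs' => simp [speakGo, Jwords]
  | succ n ih =>
    intro cs a y w m h
    cases cs with
    | nil => simp [speakGo, Jwords]
    | cons c cs' =>
      constructor
      · intro hrun
        rw [speakGo] at hrun
        split_ifs at hrun with h1 h2 h3 h4
        · obtain ⟨hp, hf⟩ := Bool.and_eq_true_iff.mp h1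
          obtain ⟨t, ht⟩ := (List.isPrefixOf_iff_prefix.mp hp)
          have hd : (c :: cs').drop 3 = t := by rw [← ht]; simp
          rw [hd] at hrun
          have := (ih t false y w m (by subst hf; simp at h ⊢; omega)).mp hrun
          simpa [Jwords, hf, ← ht] using this
        · obtain ⟨hp, hf⟩ := Bool.and_eq_true_iff.mp h2
          obtain ⟨t, ht⟩ := (List.isPrefixOf_iff_prefix.mp hp)
          have hd : (c :: cs').drop 2 = t := by rw [← ht]; simp
          rw [hd] at hrun
          have := (ih t a false w m (by subst hf; simp at h ⊢; omega)).mp hrun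
          simpa [Jwords, hf, ← ht] using this
        · obtain ⟨hp, hf⟩ := Bool.and_eq_true_iff.mp h3
          obtain ⟨t, ht⟩ := (List.isPrefixOf_iff_prefix.mp hp)
          have hd : (c :: cs').drop 3 = t := by rw [← ht]; simp
          rw [hd] at hrun
          have := (ih t a y false m (by subst hf; simp at h ⊢; omega)).mp hrun
          simpa [Jwords, hf, ← ht] using this
        · obtain ⟨hp, hf⟩ := Bool.and_eq_true_iff.mp h4
          obtain ⟨t, ht⟩ := (List.isPrefixOf_iff_prefix.mp hp)
          have hd : (c :: cs').drop 2 = t := by rw [← ht]; simp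
          rw [hd] at hrun
          have := (ih t a y w false (by subst hf; simp at h ⊢; omega)).mp hrun
          simpa [Jwords, hf, ← ht] using this
      · intro hmem
        simp [Jwords] at hmem
        rcases hmem with ⟨hf, t, htJ, hc1, hrest⟩ | ⟨hf, t, htJ, hc1, hrest⟩ |
          ⟨hf, t, htJ, hc1, hrest⟩ | ⟨hf, t, htJ, hc1, hrest⟩
        · have hrec := (ih t false y w m (by subst hf; simp at h ⊢; omega)).mpr htJ
          subst hc1; subst hrest
          simp [speakGo, List.isPrefixOf, hf, hrec]
        · have hrec := (ih t a false w m (by subst hf; simp at h ⊢; omega)).mpr htJ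
          subst hc1; subst hrest
          simp [speakGo, List.isPrefixOf, hf, hrec]
        · have hrec := (ih t a y false m (by subst hf; simp at h ⊢; omega)).mpr htJ
          subst hc1; subst hrest
          simp [speakGo, List.isPrefixOf, hf, hrec]
        · have hrec := (ih t a y w false (by subst hf; simp at h ⊢; omega)).mpr htJ
          subst hc1; subst hrest
          simp [speakGo, List.isPrefixOf, hf, hrec]

theorem mem_A_iff (s : String) :
    s ∈ allOfWordsA ↔ (s.toList ∈ Jwords 4 true true true true ∧ s.toList ≠ []) := by
  constructor
  · intro h
    exact (by decide : ∀ x ∈ allOfWordsA, x.toList ∈ Jwords 4 true true true true ∧ x.toList ≠ []) s h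
  · rintro ⟨h1, h2⟩
    have := (by decide : ∀ c ∈ Jwords 4 true true true true, c ≠ [] → String.ofList c ∈ allOfWordsA) _ h1 h2
    simpa using this

theorem speakableB_iff (s : String) : speakableB s = true ↔ s ∈ allOfWordsA := by
  have hiff := speakGo_iff 4 s.toList true true true true (by simp)
  have h1 : s.isEmpty = true ↔ s.toList = [] := by
    rw [String.isEmpty_iff, ← String.toList_eq_nil_iff]
  have hempty : (!s.isEmpty) = true ↔ s.toList ≠ [] := by
    rw [Bool.not_eq_eq_eq_not, Bool.not_true, ← Bool.not_eq_true, h1]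
  rw [mem_A_iff]
  unfold speakableB
  by_cases hg : speakGo s.toList true true true true = true
  · rw [if_pos hg]
    exact ⟨fun hne => ⟨hiff.mp hg, hempty.mp hne⟩, fun hr => hempty.mpr hr.2⟩
  · rw [if_neg hg]
    exact ⟨fun hfalse => absurd hfalse (by simp), fun hr => absurd (hiff.mpr hr.1) hg⟩

theorem fold_count_congr (l : List String) (acc : Int) :
    l.foldl (fun answer i => if i ∈ allOfWordsA then answer + 1 else answer) acc
      = l.foldl (fun n s => if speakableB s then n + 1 else n) acc := by
  induction l generalizing acc with
  | nil => rfl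
  | cons x xs ih =>
    simp only [List.foldl_cons]
    rw [show (if x ∈ allOfWordsA then acc + 1 else acc) = (if speakableB x then acc + 1 else acc) by
      by_cases hx : speakableB x = true
      · simp [hx, (speakableB_iff x).mp hx]
      · have hnx : x ∉ allOfWordsA := fun hmem => hx ((speakableB_iff x).mpr hmem)
        simp [Bool.not_eq_true] at hx
        simp [hx, hnx]]
    exact ih _

-- ===== VERDICT (by name: the statement is the Claim_ definition above) =====
theorem solution_spec : Claim_equal_solution := by
  intro babbling _
  unfold Spec_solution solution solution_alt
  exact fold_count_congr babbling 0
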